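-- pv_equiv track=rewrite | github.com/Jung-Haewon/Backjoon | Algorithm/assignment 5/ver2/ballpark.py | process
-- ===== SOURCE A (Python) =====
-- def process(n, m, array):
--     default = [[min(m-a, n-b) for a in range(m)] for b in range(n)]
--
--     for i in range(n):
--         for j in range(m):
--             if array[i][j] == 1:
--                 default[i][j] = 0
--
--     cnt = 0
--     ans = []
--     big = 0
--     for i in range(n-2,-1,-1):
--         for j in range(m-2,-1,-1):
--             if default[i][j] != 0:
--                 default[i][j] = min(default[i][j+1], default[i+1][j], default[i+1][j+1]) + 1
--             if big < default[i][j]: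
--                 big = default[i][j]
--                 cnt = 1
--                 ans = [[j,i]]
--             elif big == default[i][j]:
--                 cnt += 1
--                 ans.append([j,i])
--
--     return cnt, sorted(ans), big
-- ===== SOURCE B (Python) =====
-- def process(n, m, array):
--     # Bottom-up two-row maximal-square DP, then a separate max pass and an
--     # in-order comprehension for the positions (no tracker, no sort).
--     if n < 2 or m < 2:
--         return 0, [], 0
--     dp = []
--     below = [0] * (m + 1)
--     for i in range(n - 1, -1, -1):
--         row = [0]
--         for j in range(m - 1, -1, -1):
--             v = 0 if array[i][j] == 1 else min(row[0], below[j], below[j + 1]) + 1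
--             row.insert(0, v)
--         dp.insert(0, row)
--         below = row
--     big = 0
--     for i in range(n - 1):
--         for j in range(m - 1):
--             if dp[i][j] > big:
--                 big = dp[i][j]
--     ans = [[j, i] for j in range(m - 1) for i in range(n - 1) if dp[i][j] == big]
--     return len(ans), ans, big
-- ===== Notes on version B (the rewrite author's own statement) =====
-- stated objective: alternative
-- what changed: B builds the DP table bottom-up row by row (prepending, with a sentinel column) instead of mutating a pre-filled min(m-a,n-b) table in place, and replaces A's running max-tracker-with-reset plus final sort by a separate max pass and a j-major comprehension that emits the positions already in sorted order.
import Mathlib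
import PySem

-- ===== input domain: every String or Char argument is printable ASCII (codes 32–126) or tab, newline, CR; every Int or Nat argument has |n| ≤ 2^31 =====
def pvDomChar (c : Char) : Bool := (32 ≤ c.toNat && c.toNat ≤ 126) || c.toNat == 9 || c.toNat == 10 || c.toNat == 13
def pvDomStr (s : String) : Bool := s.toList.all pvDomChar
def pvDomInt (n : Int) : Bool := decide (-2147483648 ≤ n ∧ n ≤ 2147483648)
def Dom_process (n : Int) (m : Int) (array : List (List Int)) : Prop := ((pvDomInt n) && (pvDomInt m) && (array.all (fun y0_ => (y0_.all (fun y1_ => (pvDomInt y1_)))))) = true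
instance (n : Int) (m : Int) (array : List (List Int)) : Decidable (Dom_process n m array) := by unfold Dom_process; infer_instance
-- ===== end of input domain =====

-- B replaces A's running max-tracker (with its reset-and-sort) by a bottom-up two-row DP build
-- followed by a separate max pass and an already-sorted comprehension of the positions (objective: alternative).

-- ===== PORT A =====
def pvAGet (d : List (List Int)) (i j : Int) : Int :=
  PySem.List.pyGetD (PySem.List.pyGetD d i []) j 0

def pvASet (d : List (List Int)) (i j : Int) (v : Int) : List (List Int) :=
  d.set i.toNat ((PySem.List.pyGetD d i []).set j.toNat v)

def process (n : Int) (m : Int) (array : List (List Int)) : Int × List (List Int) × Int :=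
  let d0 : List (List Int) := (PySem.List.pyRange 0 n 1).map (fun b => (PySem.List.pyRange 0 m 1).map (fun a => min (m - a) (n - b)));
  let d1 : List (List Int) := (PySem.List.pyRange 0 n 1).foldl (fun d i =>
      (PySem.List.pyRange 0 m 1).foldl (fun d j =>
        if pvAGet array i j == 1 then pvASet d i j 0 else d) d) d0;
  let s := (PySem.List.pyRange (n-2) (-1) (-1)).foldl (fun s i =>
      (PySem.List.pyRange (m-2) (-1) (-1)).foldl (fun (s : List (List Int) × Int × List (List Int) × Int) j =>
        let d := s.1; let cnt := s.2.1; let ans := s.2.2.1; let big := s.2.2.2;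
        let d' := if pvAGet d i j ≠ 0 then pvASet d i j (min (pvAGet d i (j+1)) (min (pvAGet d (i+1) j) (pvAGet d (i+1) (j+1))) + 1) else d;
        let v := pvAGet d' i j;
        if big < v then (d', 1, [[j, i]], v)
        else if big == v then (d', cnt + 1, ans ++ [[j, i]], big)
        else (d', cnt, ans, big)) s) (d1, 0, ([] : List (List Int)), 0);
  (s.2.1, PySem.List.sorted s.2.2.1 (fun x => x) false, s.2.2.2)

-- ===== PORT B =====
def pvBGet (d : List (List Int)) (i j : Int) : Int :=
  PySem.List.pyGetD (PySem.List.pyGetD d i []) j 0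

def process_alt (n : Int) (m : Int) (array : List (List Int)) : Int × List (List Int) × Int :=
  if n < 2 ∨ m < 2 then (0, [], 0) else
  let bs := (PySem.List.pyRange (n-1) (-1) (-1)).foldl (fun (st : List (List Int) × List Int) i =>
      let row := (PySem.List.pyRange (m-1) (-1) (-1)).foldl (fun (row : List Int) j =>
          (if pvBGet array i j == 1 then 0 else
            min (row.headD 0) (min (PySem.List.pyGetD st.2 j 0) (PySem.List.pyGetD st.2 (j+1) 0)) + 1) :: row) [0];
      (row :: st.1, row)) (([] : List (List Int)), List.replicate (m+1).toNat 0);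
  let dp := bs.1;
  let big := (PySem.List.pyRange 0 (n-1) 1).foldl (fun big i =>
      (PySem.List.pyRange 0 (m-1) 1).foldl (fun big j =>
        if pvBGet dp i j > big then pvBGet dp i j else big) big) 0;
  let ans := (PySem.List.pyRange 0 (m-1) 1).flatMap (fun j =>
      ((PySem.List.pyRange 0 (n-1) 1).filter (fun i => pvBGet dp i j == big)).map (fun i => [j, i]));
  ((ans.length : Int), ans, big)

-- ===== PRECONDITION & SPEC =====
-- Pre_process excludes exactly the inputs on which the Python A raises an IndexError
-- (with n > 0 and m > 0: fewer than n rows, or a row among the first n shorter than m).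
def Pre_process (n : Int) (m : Int) (array : List (List Int)) : Prop :=
  0 < n → 0 < m → (n ≤ (array.length : Int) ∧ ∀ row ∈ array.take n.toNat, m ≤ (row.length : Int))
instance (n : Int) (m : Int) (array : List (List Int)) : Decidable (Pre_process n m array) := by unfold Pre_process; infer_instance

def pvWitness_process : Int × Int × List (List Int) := (2, 2, [[0, 0], [0, 1]])


def Spec_process (n : Int) (m : Int) (array : List (List Int)) (out : Int × List (List Int) × Int) : Prop := out = process_alt n m array
instance (n : Int) (m : Int) (array : List (List Int)) (out : Int × List (List Int) × Int) : Decidable (Spec_process n m array out) := by unfold Spec_process; infer_instance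

-- ===== CLAIM (what is proved, stated in full; the proofs are below) =====
def Claim_equal_process : Prop := ∀ (n : Int) (m : Int) (array : List (List Int)), Dom_process n m array → Pre_process n m array → Spec_process n m array (process n m array)


-- ===== LEMMAS AND PROOFS =====

-- ---- generalities ----
lemma pv_countdown_eq (a : Int) :
    PySem.List.pyRange ((a.toNat : Int) - 1) (-1) (-1) = PySem.List.pyRange (a - 1) (-1) (-1) := by
  by_cases h : 0 ≤ a
  · rw [Int.toNat_of_nonneg h]
  · rw [PySem.List.pyRange_neg_one_eq_nil (by omega), PySem.List.pyRange_neg_one_eq_nil (by omega)]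

lemma pv_if_max (b x : Int) : (if x > b then x else b) = max b x := by
  split_ifs <;> omega

-- ---- the DP spec function ----

def pvF (n m : Int) (ar : List (List Int)) (i j : Int) : Int :=
  if pvAGet ar i j == 1 then 0
  else if n - 1 ≤ i ∨ m - 1 ≤ j then min (m - j) (n - i)
  else min (pvF n m ar i (j+1)) (min (pvF n m ar (i+1) j) (pvF n m ar (i+1) (j+1))) + 1
termination_by ((n - i) + (m - j)).toNat
decreasing_by all_goals (rename_i h1 h2; rw [not_or] at h2; omega)

def pvZ (n m : Int) (ar : List (List Int)) (i j : Int) : Int :=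
  if pvAGet ar i j == 1 then 0 else min (m - j) (n - i)

def pvFx (n m : Int) (ar : List (List Int)) (i j : Int) : Int :=
  if n - 1 < i ∨ m - 1 < j then 0 else pvF n m ar i j

lemma pvF_of_one (n m : Int) (ar : List (List Int)) (i j : Int)
    (h : pvAGet ar i j == 1) : pvF n m ar i j = 0 := by
  rw [pvF]; simp [h]

lemma pvF_nonneg (n m : Int) (ar : List (List Int)) (i j : Int)
    (hi : i ≤ n - 1) (hj : j ≤ m - 1) : 0 ≤ pvF n m ar i j := by
  suffices H : ∀ (K : Nat) (i j : Int), ((n - i) + (m - j)).toNat ≤ K → i ≤ n - 1 → j ≤ m - 1 →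
      0 ≤ pvF n m ar i j from H (((n - i) + (m - j)).toNat) i j le_rfl hi hj
  intro K
  induction K with
  | zero => intro i j hK hi hj; omega
  | succ K ih =>
    intro i j hK hi hj
    rw [pvF]
    split
    · exact le_rfl
    · split
      · omega
      · rename_i hbase
        rw [not_or] at hbase
        have h1 := ih i (j+1) (by omega) (by omega) (by omega)
        have h2 := ih (i+1) j (by omega) (by omega) (by omega)
        have h3 := ih (i+1) (j+1) (by omega) (by omega) (by omega)
        omega

lemma pvF_boundary (n m : Int) (ar : List (List Int)) (i j : Int)
    (hi : i ≤ n - 1) (hj : j ≤ m - 1) (h : n - 1 ≤ i ∨ m - 1 ≤ j) :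
    pvF n m ar i j = pvZ n m ar i j := by
  rw [pvF, pvZ]
  have h2 : n ≤ i + 1 ∨ m ≤ j + 1 := by omega
  by_cases hg : pvAGet ar i j == 1 <;> simp [hg, h2]

lemma pvF_row_n (n m : Int) (ar : List (List Int)) (j : Int) (hj : j < m) :
    pvF n m ar n j = 0 := by
  rw [pvF]
  have h1 : n - 1 ≤ n := by omega
  have h2 : min (m - j) (n - n) = 0 := by omega
  simp only [h1, true_or, if_true, h2]
  split <;> rfl

lemma pvFx_nonneg (n m : Int) (ar : List (List Int)) (i j : Int)
    (hi : i ≤ n) (hj : j ≤ m) : 0 ≤ pvFx n m ar i j := by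
  unfold pvFx
  split
  · omega
  · exact pvF_nonneg n m ar i j (by omega) (by omega)

lemma pvF_step (n m : Int) (ar : List (List Int)) (i j : Int)
    (hi0 : 0 ≤ i) (hi : i ≤ n - 1) (hj0 : 0 ≤ j) (hj : j ≤ m - 1) :
    pvF n m ar i j = if pvAGet ar i j == 1 then 0
      else min (pvFx n m ar i (j+1)) (min (pvFx n m ar (i+1) j) (pvFx n m ar (i+1) (j+1))) + 1 := by
  by_cases hg : pvAGet ar i j == 1
  · rw [pvF_of_one n m ar i j hg]; simp [hg]
  · by_cases hint : i < n - 1 ∧ j < m - 1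
    · have e1 : pvFx n m ar i (j+1) = pvF n m ar i (j+1) := by
        unfold pvFx; rw [if_neg (by omega)]
      have e2 : pvFx n m ar (i+1) j = pvF n m ar (i+1) j := by
        unfold pvFx; rw [if_neg (by omega)]
      have e3 : pvFx n m ar (i+1) (j+1) = pvF n m ar (i+1) (j+1) := by
        unfold pvFx; rw [if_neg (by omega)]
      rw [pvF, e1, e2, e3]
      simp only [hg, if_false, Bool.false_eq_true]
      rw [if_neg (by omega)]
    · -- boundary: i = n-1 or j = m-1
      simp only [hg, if_false, Bool.false_eq_true]
      rcases (by omega : i = n - 1 ∨ (j = m - 1 ∧ i < n - 1)) with hb | hb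
      · have e2 : pvFx n m ar (i+1) j = 0 := by unfold pvFx; rw [if_pos (by omega)]
        have e3 : pvFx n m ar (i+1) (j+1) = 0 := by unfold pvFx; rw [if_pos (by omega)]
        have hx := pvFx_nonneg n m ar i (j+1) (by omega) (by omega)
        rw [pvF_boundary n m ar i j hi hj (by omega), pvZ]
        simp only [hg, if_false, Bool.false_eq_true]
        rw [e2, e3]
        omega
      · have e1 : pvFx n m ar i (j+1) = 0 := by unfold pvFx; rw [if_pos (by omega)]
        have e3 : pvFx n m ar (i+1) (j+1) = 0 := by unfold pvFx; rw [if_pos (by omega)]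
        have hy := pvFx_nonneg n m ar (i+1) j (by omega) (by omega)
        rw [pvF_boundary n m ar i j hi hj (by omega), pvZ]
        simp only [hg, if_false, Bool.false_eq_true]
        rw [e1, e3]
        omega

-- ---- canonical tables ----

def pvTab (n m : Int) (w : Int → Int → Int) : List (List Int) :=
  (PySem.List.pyRange 0 n 1).map (fun i => (PySem.List.pyRange 0 m 1).map (fun j => w i j))

lemma pv_set_map_pyRange {α : Type} (f : Int → α) (N j : Int) (v : α)
    (hj0 : 0 ≤ j) (hj : j < N) :
    ((PySem.List.pyRange 0 N 1).map f).set j.toNat v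
      = (PySem.List.pyRange 0 N 1).map (fun x => if x = j then v else f x) := by
  apply List.ext_getElem
  · simp
  · intro k h1 h2
    have hk : (k : Int) < N := by
      simp only [List.length_map, PySem.List.length_pyRange_one] at h2
      omega
    simp only [List.getElem_set, List.getElem_map, PySem.List.getElem_pyRange_one]
    split_ifs <;> first | rfl | omega

lemma pvTab_get (n m : Int) (w : Int → Int → Int) (i j : Int)
    (hi0 : 0 ≤ i) (hi : i < n) (hj0 : 0 ≤ j) (hj : j < m) :
    pvAGet (pvTab n m w) i j = w i j := by
  unfold pvAGet pvTab
  rw [PySem.List.pyGetD_map_pyRange_of_nonneg _ n i _ hi0 hi,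
      PySem.List.pyGetD_map_pyRange_of_nonneg _ m j _ hj0 hj]

lemma pvTab_set (n m : Int) (w : Int → Int → Int) (i j : Int) (v : Int)
    (hi0 : 0 ≤ i) (hi : i < n) (hj0 : 0 ≤ j) (hj : j < m) :
    pvASet (pvTab n m w) i j v
      = pvTab n m (fun i' j' => if i' = i ∧ j' = j then v else w i' j') := by
  unfold pvASet pvTab
  rw [PySem.List.pyGetD_map_pyRange_of_nonneg
        (fun i' => (PySem.List.pyRange 0 m 1).map (fun j' => w i' j')) n i [] hi0 hi]
  rw [pv_set_map_pyRange (fun j' => w i j') m j v hj0 hj]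
  rw [pv_set_map_pyRange (fun i' => (PySem.List.pyRange 0 m 1).map (fun j' => w i' j')) n i
        _ hi0 hi]
  apply List.map_congr_left
  intro x hx
  by_cases e : x = i
  · subst e
    rw [if_pos rfl]
    apply List.map_congr_left
    intro y _
    by_cases e2 : y = j <;> simp [e2]
  · rw [if_neg e]
    apply List.map_congr_left
    intro y _
    dsimp only
    rw [if_neg (by tauto)]

lemma pvTab_congr (n m : Int) (w w' : Int → Int → Int)
    (h : ∀ i j, 0 ≤ i → i < n → 0 ≤ j → j < m → w i j = w' i j) :
    pvTab n m w = pvTab n m w' := by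
  unfold pvTab
  apply List.map_congr_left
  intro i hi
  rw [PySem.List.mem_pyRange_one] at hi
  apply List.map_congr_left
  intro j hj
  rw [PySem.List.mem_pyRange_one] at hj
  exact h i j hi.1 hi.2 hj.1 hj.2

-- ---- zero pass ----

lemma pv_zero_inner (n m : Int) (ar : List (List Int)) (w : Int → Int → Int) (i : Int)
    (hi0 : 0 ≤ i) (hi : i < n) :
    (PySem.List.pyRange 0 m 1).foldl
        (fun d j => if pvAGet ar i j == 1 then pvASet d i j 0 else d) (pvTab n m w)
      = pvTab n m (fun i' j' => if i' = i ∧ pvAGet ar i' j' == 1 then 0 else w i' j') := by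
  have aux : ∀ (k : Nat), (k : Int) ≤ m →
      (PySem.List.pyRange 0 (k : Int) 1).foldl
          (fun d j => if pvAGet ar i j == 1 then pvASet d i j 0 else d) (pvTab n m w)
        = pvTab n m (fun i' j' =>
            if i' = i ∧ j' < (k : Int) ∧ pvAGet ar i' j' == 1 then 0 else w i' j') := by
    intro k
    induction k with
    | zero =>
      intro _
      simp only [Nat.cast_zero]
      rw [PySem.List.pyRange_one_eq_nil (a := 0) (b := 0) le_rfl]
      simp only [List.foldl_nil]
      apply pvTab_congr
      intro i' j' h1 h2 h3 h4
      rw [if_neg (by rintro ⟨-, hlt, -⟩; omega)]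
    | succ k ih =>
      intro hk
      have hc : ((k+1 : Nat) : Int) = (k : Int) + 1 := by push_cast; ring
      rw [hc, PySem.List.pyRange_one_succ_right (by exact_mod_cast Nat.zero_le k),
          List.foldl_append, ih (by omega)]
      simp only [List.foldl_cons, List.foldl_nil]
      by_cases hg : pvAGet ar i (k : Int) == 1
      · rw [if_pos hg, pvTab_set n m _ i (k : Int) 0 hi0 hi (by omega) (by omega)]
        apply pvTab_congr
        intro i' j' h1 h2 h3 h4
        by_cases e1 : i' = i
        · subst e1
          by_cases e2 : j' = (k : Int)
          · subst e2
            rw [if_pos ⟨rfl, rfl⟩, if_pos ⟨rfl, by omega, hg⟩]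
          · rw [if_neg (by tauto)]
            refine if_congr ⟨?_, ?_⟩ rfl rfl
            · rintro ⟨a, b, c⟩; exact ⟨a, by omega, c⟩
            · rintro ⟨a, b, c⟩; exact ⟨a, by omega, c⟩
        · rw [if_neg (by tauto), if_neg (by tauto), if_neg (by tauto)]
      · rw [if_neg hg]
        apply pvTab_congr
        intro i' j' h1 h2 h3 h4
        refine if_congr ⟨?_, ?_⟩ rfl rfl
        · rintro ⟨a, b, c⟩; exact ⟨a, by omega, c⟩
        · rintro ⟨a, b, c⟩
          refine ⟨a, ?_, c⟩
          rcases (by omega : j' < (k : Int) ∨ j' = (k : Int)) with h | h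
          · exact h
          · subst h; subst a; exact absurd c hg
  by_cases hm : 0 ≤ m
  · have hr : PySem.List.pyRange 0 ((m.toNat : Nat) : Int) 1 = PySem.List.pyRange 0 m 1 := by
      rw [Int.toNat_of_nonneg hm]
    rw [← hr, aux m.toNat (by omega)]
    apply pvTab_congr
    intro i' j' h1 h2 h3 h4
    refine if_congr ⟨?_, ?_⟩ rfl rfl
    · rintro ⟨a, -, c⟩; exact ⟨a, c⟩
    · rintro ⟨a, c⟩; exact ⟨a, by omega, c⟩
  · rw [PySem.List.pyRange_one_eq_nil (a := 0) (b := m) (by omega)]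
    simp only [List.foldl_nil]
    apply pvTab_congr
    intro i' j' h1 h2 h3 h4
    exact absurd h4 (by omega)

lemma pv_zero_outer (n m : Int) (ar : List (List Int)) (w : Int → Int → Int) :
    (PySem.List.pyRange 0 n 1).foldl
        (fun d i => (PySem.List.pyRange 0 m 1).foldl
          (fun d j => if pvAGet ar i j == 1 then pvASet d i j 0 else d) d) (pvTab n m w)
      = pvTab n m (fun i j => if pvAGet ar i j == 1 then 0 else w i j) := by
  have aux : ∀ (k : Nat), (k : Int) ≤ n →
      (PySem.List.pyRange 0 (k : Int) 1).foldl
          (fun d i => (PySem.List.pyRange 0 m 1).foldl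
            (fun d j => if pvAGet ar i j == 1 then pvASet d i j 0 else d) d) (pvTab n m w)
        = pvTab n m (fun i j =>
            if i < (k : Int) ∧ pvAGet ar i j == 1 then 0 else w i j) := by
    intro k
    induction k with
    | zero =>
      intro _
      simp only [Nat.cast_zero]
      rw [PySem.List.pyRange_one_eq_nil (a := 0) (b := 0) le_rfl]
      simp only [List.foldl_nil]
      apply pvTab_congr
      intro i' j' h1 h2 h3 h4
      rw [if_neg (by rintro ⟨hlt, -⟩; omega)]
    | succ k ih =>
      intro hk
      have hc : ((k+1 : Nat) : Int) = (k : Int) + 1 := by push_cast; ring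
      rw [hc, PySem.List.pyRange_one_succ_right (by exact_mod_cast Nat.zero_le k),
          List.foldl_append, ih (by omega)]
      simp only [List.foldl_cons, List.foldl_nil]
      rw [pv_zero_inner n m ar
            (fun i j => if i < (k : Int) ∧ pvAGet ar i j == 1 then 0 else w i j)
            (k : Int) (by exact_mod_cast Nat.zero_le k) (by omega)]
      apply pvTab_congr
      intro i' j' h1 h2 h3 h4
      by_cases e1 : i' = (k : Int)
      · by_cases c : pvAGet ar i' j' == 1
        · rw [if_pos ⟨e1, c⟩, if_pos ⟨by omega, c⟩]
        · rw [if_neg (by rintro ⟨-, hc⟩; exact c hc),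
              if_neg (by rintro ⟨-, hc⟩; exact c hc),
              if_neg (by rintro ⟨-, hc⟩; exact c hc)]
      · rw [if_neg (by tauto)]
        refine if_congr ⟨?_, ?_⟩ rfl rfl
        · rintro ⟨a, c⟩; exact ⟨by omega, c⟩
        · rintro ⟨a, c⟩
          refine ⟨?_, c⟩
          rcases (by omega : i' < (k : Int) ∨ i' = (k : Int)) with h | h
          · exact h
          · exact absurd h e1
  by_cases hn : 0 ≤ n
  · have hr : PySem.List.pyRange 0 ((n.toNat : Nat) : Int) 1 = PySem.List.pyRange 0 n 1 := by
      rw [Int.toNat_of_nonneg hn]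
    rw [← hr, aux n.toNat (by omega)]
    apply pvTab_congr
    intro i' j' h1 h2 h3 h4
    refine if_congr ⟨?_, ?_⟩ rfl rfl
    · rintro ⟨-, c⟩; exact c
    · intro c; exact ⟨by omega, c⟩
  · rw [PySem.List.pyRange_one_eq_nil (a := 0) (b := n) (by omega)]
    simp only [List.foldl_nil]
    apply pvTab_congr
    intro i' j' h1 h2 h3 h4
    exact absurd h2 (by omega)

-- ---- the tracker ----

def pvPos (c : Int × Int) : List Int := [c.2, c.1]

def pvStepT (w : Int × Int → Int) (t : Int × List (List Int) × Int) (c : Int × Int) :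
    Int × List (List Int) × Int :=
  if t.2.2 < w c then (1, [pvPos c], w c)
  else if t.2.2 == w c then (t.1 + 1, t.2.1 ++ [pvPos c], t.2.2)
  else t

def pvMax (w : Int × Int → Int) (L : List (Int × Int)) : Int :=
  L.foldl (fun b c => max b (w c)) 0

lemma pv_trk (w : Int × Int → Int) (L : List (Int × Int)) :
    L.foldl (pvStepT w) (0, [], 0)
      = (((L.filter (fun c => w c == pvMax w L)).length : Int),
         (L.filter (fun c => w c == pvMax w L)).map pvPos, pvMax w L) := by
  induction L using List.reverseRecOn with
  | nil => simp [pvMax]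
  | append_singleton L x ih =>
    have hM : pvMax w (L ++ [x]) = max (pvMax w L) (w x) := by
      unfold pvMax
      rw [List.foldl_append]
      simp only [List.foldl_cons, List.foldl_nil]
    have hub : ∀ c ∈ L, w c ≤ pvMax w L := (PySem.List.le_foldl_max_int L w 0).2
    rw [List.foldl_append, ih]
    simp only [List.foldl_cons, List.foldl_nil]
    unfold pvStepT
    dsimp only
    by_cases h1 : pvMax w L < w x
    · rw [if_pos h1]
      have hM' : pvMax w (L ++ [x]) = w x := by rw [hM]; omega
      have hnil : L.filter (fun c => w c == pvMax w (L ++ [x])) = [] := by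
        rw [List.filter_eq_nil_iff]
        intro c hc
        have := hub c hc
        simp only [hM', beq_iff_eq]
        omega
      rw [List.filter_append, hnil, hM']
      simp
    · rw [if_neg h1]
      by_cases h2 : pvMax w L == w x
      · rw [if_pos h2]
        have h2' : pvMax w L = w x := by simpa using h2
        have hM' : pvMax w (L ++ [x]) = pvMax w L := by rw [hM]; omega
        rw [hM', List.filter_append]
        have hone : [x].filter (fun c => w c == pvMax w L) = [x] := by
          simp [h2'.symm]
        rw [hone]
        simp
      · rw [if_neg h2]
        have h2' : pvMax w L ≠ w x := by simpa using h2
        have hM' : pvMax w (L ++ [x]) = pvMax w L := by rw [hM]; omega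
        rw [hM', List.filter_append]
        have hnone : [x].filter (fun c => w c == pvMax w L) = [] := by
          simp only [List.filter_cons, List.filter_nil, beq_iff_eq]
          rw [if_neg (by omega)]
        rw [hnone]
        simp

-- ---- the sweep ----

def pvW (n m : Int) (ar : List (List Int)) : Int × Int → Int := fun c => pvF n m ar c.1 c.2

def pvMix (n m : Int) (ar : List (List Int)) (i0 j0 : Int) : Int → Int → Int :=
  fun i j => if i < i0 ∨ (i = i0 ∧ j ≤ j0) then pvZ n m ar i j else pvF n m ar i j

def pvCells (n m : Int) : List (Int × Int) :=
  (PySem.List.pyRange (n-2) (-1) (-1)).flatMap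
    (fun i => (PySem.List.pyRange (m-2) (-1) (-1)).map (fun j => (i, j)))

lemma pv_sweep_step (n m : Int) (ar : List (List Int)) (i0 j : Int)
    (t : Int × List (List Int) × Int)
    (s : List (List Int) × Int × List (List Int) × Int)
    (hs : s = (pvTab n m (pvMix n m ar i0 j), t))
    (hi0 : 0 ≤ i0) (hi0' : i0 ≤ n - 2) (hj0 : 0 ≤ j) (hj : j ≤ m - 2) :
    (let d := s.1; let cnt := s.2.1; let ans := s.2.2.1; let big := s.2.2.2;
     let d' := if pvAGet d i0 j ≠ 0 then pvASet d i0 j (min (pvAGet d i0 (j+1)) (min (pvAGet d (i0+1) j) (pvAGet d (i0+1) (j+1))) + 1) else d;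
     let v := pvAGet d' i0 j;
     if big < v then (d', 1, [[j, i0]], v)
     else if big == v then (d', cnt + 1, ans ++ [[j, i0]], big)
     else (d', cnt, ans, big))
    = (pvTab n m (pvMix n m ar i0 (j-1)), pvStepT (pvW n m ar) t (i0, j)) := by
  subst hs
  have hzk : pvAGet (pvTab n m (pvMix n m ar i0 j)) i0 j = pvZ n m ar i0 j := by
    rw [pvTab_get n m _ i0 j hi0 (by omega) hj0 (by omega)]
    unfold pvMix
    rw [if_pos (Or.inr ⟨rfl, le_rfl⟩)]
  have hr1 : pvAGet (pvTab n m (pvMix n m ar i0 j)) i0 (j+1) = pvF n m ar i0 (j+1) := by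
    rw [pvTab_get n m _ i0 (j+1) hi0 (by omega) (by omega) (by omega)]
    unfold pvMix
    rw [if_neg (by rintro (h | ⟨-, h⟩) <;> omega)]
  have hr2 : pvAGet (pvTab n m (pvMix n m ar i0 j)) (i0+1) j = pvF n m ar (i0+1) j := by
    rw [pvTab_get n m _ (i0+1) j (by omega) (by omega) hj0 (by omega)]
    unfold pvMix
    rw [if_neg (by rintro (h | ⟨h, -⟩) <;> omega)]
  have hr3 : pvAGet (pvTab n m (pvMix n m ar i0 j)) (i0+1) (j+1) = pvF n m ar (i0+1) (j+1) := by
    rw [pvTab_get n m _ (i0+1) (j+1) (by omega) (by omega) (by omega) (by omega)]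
    unfold pvMix
    rw [if_neg (by rintro (h | ⟨h, -⟩) <;> omega)]
  have hmixeq : ∀ (VAL : Int), VAL = pvF n m ar i0 j →
      pvTab n m (fun a b => if a = i0 ∧ b = j then VAL else pvMix n m ar i0 j a b)
        = pvTab n m (pvMix n m ar i0 (j-1)) := by
    intro VAL hVAL
    apply pvTab_congr
    intro a b h1 h2 h3 h4
    by_cases e : a = i0 ∧ b = j
    · obtain ⟨e1, e2⟩ := e
      rw [if_pos ⟨e1, e2⟩, hVAL]
      unfold pvMix
      subst e1; subst e2
      rw [if_neg (by rintro (h | ⟨-, h⟩) <;> omega)]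
    · rw [if_neg e]
      unfold pvMix
      refine if_congr ⟨?_, ?_⟩ rfl rfl
      · rintro (h | ⟨h1', h2'⟩)
        · exact Or.inl h
        · refine Or.inr ⟨h1', ?_⟩
          have : b ≠ j := fun hb => e ⟨h1', hb⟩
          omega
      · rintro (h | ⟨h1', h2'⟩)
        · exact Or.inl h
        · exact Or.inr ⟨h1', by omega⟩
  have hvread : pvAGet (pvTab n m (pvMix n m ar i0 (j-1))) i0 j = pvF n m ar i0 j := by
    rw [pvTab_get n m _ i0 j hi0 (by omega) hj0 (by omega)]
    unfold pvMix
    rw [if_neg (by rintro (h | ⟨-, h⟩) <;> omega)]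
  dsimp only
  rw [hzk, hr1, hr2, hr3]
  by_cases hg : pvAGet ar i0 j == 1
  · have hz0 : pvZ n m ar i0 j = 0 := by unfold pvZ; rw [if_pos hg]
    rw [hz0]
    simp only [ne_eq, not_true_eq_false, if_false]
    have htab : pvTab n m (pvMix n m ar i0 j) = pvTab n m (pvMix n m ar i0 (j-1)) := by
      have := hmixeq (pvF n m ar i0 j) rfl
      rw [← this]
      apply pvTab_congr
      intro a b h1 h2 h3 h4
      by_cases e : a = i0 ∧ b = j
      · obtain ⟨e1, e2⟩ := e
        rw [if_pos ⟨e1, e2⟩]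
        subst e1; subst e2
        unfold pvMix
        rw [if_pos (Or.inr ⟨rfl, le_rfl⟩)]
        rw [pvF_of_one n m ar a b hg]
        unfold pvZ
        rw [if_pos hg]
      · rw [if_neg e]
    rw [htab, hvread]
    unfold pvStepT pvW pvPos
    dsimp only
    rw [pvF_of_one n m ar i0 j hg]
    split_ifs <;> rfl
  · have hzne : pvZ n m ar i0 j ≠ 0 := by
      unfold pvZ
      rw [if_neg hg]
      omega
    simp only [ne_eq, hzne, not_false_eq_true, if_true]
    have hnew : min (pvF n m ar i0 (j+1)) (min (pvF n m ar (i0+1) j) (pvF n m ar (i0+1) (j+1))) + 1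
        = pvF n m ar i0 j := by
      conv_rhs => rw [pvF]
      simp only [hg, Bool.false_eq_true, if_false]
      rw [if_neg (by omega)]
    rw [pvTab_set n m _ i0 j _ hi0 (by omega) hj0 (by omega), hnew,
        hmixeq (pvF n m ar i0 j) rfl, hvread]
    unfold pvStepT pvW pvPos
    dsimp only
    split_ifs <;> rfl

lemma pv_sweep_inner (n m : Int) (ar : List (List Int)) (i0 : Int)
    (hi0 : 0 ≤ i0) (hi0' : i0 ≤ n - 2) :
    ∀ (k : Nat), (0 < k → (k : Int) ≤ m - 1) →
    ∀ (t : Int × List (List Int) × Int),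
    (PySem.List.pyRange ((k : Int) - 1) (-1) (-1)).foldl
        (fun (s : List (List Int) × Int × List (List Int) × Int) j =>
          let d := s.1; let cnt := s.2.1; let ans := s.2.2.1; let big := s.2.2.2;
          let d' := if pvAGet d i0 j ≠ 0 then pvASet d i0 j (min (pvAGet d i0 (j+1)) (min (pvAGet d (i0+1) j) (pvAGet d (i0+1) (j+1))) + 1) else d;
          let v := pvAGet d' i0 j;
          if big < v then (d', 1, [[j, i0]], v)
          else if big == v then (d', cnt + 1, ans ++ [[j, i0]], big)
          else (d', cnt, ans, big))
        (pvTab n m (pvMix n m ar i0 ((k : Int) - 1)), t)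
      = (pvTab n m (pvMix n m ar i0 (-1)),
         ((PySem.List.pyRange ((k : Int) - 1) (-1) (-1)).map (fun j => (i0, j))).foldl
           (pvStepT (pvW n m ar)) t) := by
  intro k
  induction k with
  | zero =>
    intro _ t
    simp only [Nat.cast_zero, zero_sub]
    rw [PySem.List.pyRange_neg_one_eq_nil (le_refl (-1))]
    simp only [List.foldl_nil, List.map_nil]
  | succ k ih =>
    intro hk t
    have hk' : ((k+1 : Nat) : Int) ≤ m - 1 := hk (Nat.succ_pos k)
    have hc : ((k+1 : Nat) : Int) - 1 = (k : Int) := by push_cast; ring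
    rw [hc, PySem.List.pyRange_neg_one_cons (a := (k : Int)) (b := -1) (by omega),
        List.foldl_cons, List.map_cons,
        pv_sweep_step n m ar i0 (k : Int) t _ rfl hi0 hi0' (by exact_mod_cast Nat.zero_le k)
          (by push_cast at hk'; omega),
        List.foldl_cons]
    exact ih (fun _ => by push_cast at hk' ⊢; omega) (pvStepT (pvW n m ar) t (i0, (k : Int)))

lemma pv_sweep_inner' (n m : Int) (ar : List (List Int)) (i0 : Int)
    (hi0 : 0 ≤ i0) (hi0' : i0 ≤ n - 2) (t : Int × List (List Int) × Int) :
    (PySem.List.pyRange (m-2) (-1) (-1)).foldl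
        (fun (s : List (List Int) × Int × List (List Int) × Int) j =>
          let d := s.1; let cnt := s.2.1; let ans := s.2.2.1; let big := s.2.2.2;
          let d' := if pvAGet d i0 j ≠ 0 then pvASet d i0 j (min (pvAGet d i0 (j+1)) (min (pvAGet d (i0+1) j) (pvAGet d (i0+1) (j+1))) + 1) else d;
          let v := pvAGet d' i0 j;
          if big < v then (d', 1, [[j, i0]], v)
          else if big == v then (d', cnt + 1, ans ++ [[j, i0]], big)
          else (d', cnt, ans, big))
        (pvTab n m (pvMix n m ar i0 (m-2)), t)
      = (pvTab n m (pvMix n m ar i0 (-1)),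
         ((PySem.List.pyRange (m-2) (-1) (-1)).map (fun j => (i0, j))).foldl
           (pvStepT (pvW n m ar)) t) := by
  have h21 : (m : Int) - 2 = m - 1 - 1 := by ring
  have hrange : PySem.List.pyRange (m-2) (-1) (-1)
      = PySem.List.pyRange ((((m-1).toNat : Nat) : Int) - 1) (-1) (-1) := by
    rw [pv_countdown_eq (m-1), h21]
  have htb : pvTab n m (pvMix n m ar i0 (m-2))
      = pvTab n m (pvMix n m ar i0 ((((m-1).toNat : Nat) : Int) - 1)) := by
    apply pvTab_congr
    intro a b h1 h2 h3 h4
    unfold pvMix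
    refine if_congr (by omega) rfl rfl
  rw [hrange, htb, pv_sweep_inner n m ar i0 hi0 hi0' (m-1).toNat (by intro _; omega) t]

lemma pv_sweep_outer (n m : Int) (ar : List (List Int)) :
    ∀ (k : Nat), (0 < k → (k : Int) ≤ n - 1) →
    ∀ (t : Int × List (List Int) × Int),
    (PySem.List.pyRange ((k : Int) - 1) (-1) (-1)).foldl
        (fun s i => (PySem.List.pyRange (m-2) (-1) (-1)).foldl
          (fun (s : List (List Int) × Int × List (List Int) × Int) j =>
            let d := s.1; let cnt := s.2.1; let ans := s.2.2.1; let big := s.2.2.2;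
            let d' := if pvAGet d i j ≠ 0 then pvASet d i j (min (pvAGet d i (j+1)) (min (pvAGet d (i+1) j) (pvAGet d (i+1) (j+1))) + 1) else d;
            let v := pvAGet d' i j;
            if big < v then (d', 1, [[j, i]], v)
            else if big == v then (d', cnt + 1, ans ++ [[j, i]], big)
            else (d', cnt, ans, big)) s)
        (pvTab n m (pvMix n m ar ((k : Int) - 1) (m-2)), t)
      = (pvTab n m (pvMix n m ar (-1) (m-2)),
         (((PySem.List.pyRange ((k : Int) - 1) (-1) (-1)).flatMap
            (fun i => (PySem.List.pyRange (m-2) (-1) (-1)).map (fun j => (i, j)))).foldl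
           (pvStepT (pvW n m ar)) t)) := by
  intro k
  induction k with
  | zero =>
    intro _ t
    simp only [Nat.cast_zero, zero_sub]
    rw [PySem.List.pyRange_neg_one_eq_nil (le_refl (-1))]
    simp only [List.foldl_nil, List.flatMap_nil]
  | succ k ih =>
    intro hk t
    have hk' : ((k+1 : Nat) : Int) ≤ n - 1 := hk (Nat.succ_pos k)
    have hc : ((k+1 : Nat) : Int) - 1 = (k : Int) := by push_cast; ring
    rw [hc, PySem.List.pyRange_neg_one_cons (a := (k : Int)) (b := -1) (by omega),
        List.foldl_cons]
    rw [pv_sweep_inner' n m ar (k : Int) (by exact_mod_cast Nat.zero_le k)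
          (by push_cast at hk'; omega) t]
    have htb2 : pvTab n m (pvMix n m ar (k : Int) (-1))
        = pvTab n m (pvMix n m ar ((k : Int) - 1) (m-2)) := by
      apply pvTab_congr
      intro a b h1 h2 h3 h4
      unfold pvMix
      by_cases e : a = (k : Int) - 1 ∧ b = m - 1
      · obtain ⟨e1, e2⟩ := e
        rw [if_pos (by omega), if_neg (by omega)]
        exact (pvF_boundary n m ar a b (by push_cast at hk'; omega) (by omega) (by omega)).symm
      · refine if_congr (by omega) rfl rfl
    rw [htb2, List.flatMap_cons, List.foldl_append]
    exact ih (fun _ => by push_cast at hk' ⊢; omega) _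

lemma pv_sweep_outer' (n m : Int) (ar : List (List Int)) (t : Int × List (List Int) × Int) :
    (PySem.List.pyRange (n-2) (-1) (-1)).foldl
        (fun s i => (PySem.List.pyRange (m-2) (-1) (-1)).foldl
          (fun (s : List (List Int) × Int × List (List Int) × Int) j =>
            let d := s.1; let cnt := s.2.1; let ans := s.2.2.1; let big := s.2.2.2;
            let d' := if pvAGet d i j ≠ 0 then pvASet d i j (min (pvAGet d i (j+1)) (min (pvAGet d (i+1) j) (pvAGet d (i+1) (j+1))) + 1) else d;
            let v := pvAGet d' i j;
            if big < v then (d', 1, [[j, i]], v)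
            else if big == v then (d', cnt + 1, ans ++ [[j, i]], big)
            else (d', cnt, ans, big)) s)
        (pvTab n m (pvMix n m ar (n-2) (m-2)), t)
      = (pvTab n m (pvMix n m ar (-1) (m-2)),
         (pvCells n m).foldl (pvStepT (pvW n m ar)) t) := by
  have h21 : (n : Int) - 2 = n - 1 - 1 := by ring
  have hrange : PySem.List.pyRange (n-2) (-1) (-1)
      = PySem.List.pyRange ((((n-1).toNat : Nat) : Int) - 1) (-1) (-1) := by
    rw [pv_countdown_eq (n-1), h21]
  have htb : pvTab n m (pvMix n m ar (n-2) (m-2))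
      = pvTab n m (pvMix n m ar ((((n-1).toNat : Nat) : Int) - 1) (m-2)) := by
    apply pvTab_congr
    intro a b h1 h2 h3 h4
    unfold pvMix
    refine if_congr (by omega) rfl rfl
  rw [hrange, htb, pv_sweep_outer n m ar (n-1).toNat (by intro _; omega) t]
  unfold pvCells
  rw [pv_countdown_eq (n-1), ← h21]

lemma pv_processA (n m : Int) (ar : List (List Int)) :
    process n m ar
      = (((((pvCells n m).filter (fun c => pvW n m ar c == pvMax (pvW n m ar) (pvCells n m))).length : Int)),
         PySem.List.sorted (((pvCells n m).filter (fun c => pvW n m ar c == pvMax (pvW n m ar) (pvCells n m))).map pvPos) (fun x => x) false,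
         pvMax (pvW n m ar) (pvCells n m)) := by
  have e0 : (PySem.List.pyRange 0 n 1).map
      (fun b => (PySem.List.pyRange 0 m 1).map (fun a => min (m - a) (n - b)))
      = pvTab n m (fun b a => min (m - a) (n - b)) := rfl
  have e2 : pvTab n m (fun i j => if pvAGet ar i j == 1 then 0
        else (fun b a => min (m - a) (n - b)) i j)
      = pvTab n m (pvMix n m ar (n-2) (m-2)) := by
    apply pvTab_congr
    intro i j h1 h2 h3 h4
    dsimp only
    show pvZ n m ar i j = pvMix n m ar (n-2) (m-2) i j
    unfold pvMix
    by_cases c : i < n - 2 ∨ (i = n - 2 ∧ j ≤ m - 2)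
    · rw [if_pos c]
    · rw [if_neg c]
      exact (pvF_boundary n m ar i j (by omega) (by omega) (by omega)).symm
  simp only [process]
  rw [e0, pv_zero_outer n m ar (fun b a => min (m - a) (n - b)), e2, pv_sweep_outer' n m ar,
      pv_trk (pvW n m ar) (pvCells n m)]

def pvSfx (n m : Int) (ar : List (List Int)) (i j0 : Int) : List Int :=
  (PySem.List.pyRange j0 m 1).map (fun j => pvF n m ar i j) ++ [0]

def pvRowF (n m : Int) (ar : List (List Int)) (i : Int) : List Int := pvSfx n m ar i 0

lemma pvRow_get_fx (n m : Int) (ar : List (List Int)) (i j : Int) (hm : 0 ≤ m)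
    (hi0 : 0 ≤ i) (hi : i ≤ n) (hj0 : 0 ≤ j) (hj : j ≤ m) :
    PySem.List.pyGetD (pvRowF n m ar i) j 0 = pvFx n m ar i j := by
  unfold pvRowF pvSfx
  by_cases hjm : j = m
  · have hx : pvFx n m ar i j = 0 := by unfold pvFx; rw [if_pos (by omega)]
    rw [hx, PySem.List.pyGetD_eq_getElem _ _ (by omega)
          (by simp [PySem.List.length_pyRange_one]; omega)]
    rw [List.getElem_append_right (by simp [PySem.List.length_pyRange_one]; omega)]
    simp [PySem.List.length_pyRange_one]
  · have hjm' : j < m := by omega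
    rw [PySem.List.pyGetD_eq_getElem _ _ (by omega)
          (by simp [PySem.List.length_pyRange_one]; omega)]
    rw [List.getElem_append_left (by simp [PySem.List.length_pyRange_one]; omega)]
    rw [List.getElem_map, PySem.List.getElem_pyRange_one]
    have hc : (0 : Int) + ((j.toNat : Nat) : Int) = j := by omega
    rw [hc]
    unfold pvFx
    by_cases hin : n - 1 < i
    · rw [if_pos (Or.inl hin)]
      have hni : i = n := by omega
      rw [hni]
      exact pvF_row_n n m ar j hjm'
    · rw [if_neg (by rintro (h | h) <;> omega)]

lemma pv_sfx_head (n m : Int) (ar : List (List Int)) (i j0 : Int)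
    (hi : i ≤ n - 1) (hj0 : 0 ≤ j0) (hj : j0 ≤ m) :
    (pvSfx n m ar i j0).headD 0 = pvFx n m ar i j0 := by
  unfold pvSfx
  by_cases hj : j0 < m
  · rw [PySem.List.pyRange_one_cons hj]
    simp only [List.map_cons, List.cons_append, List.headD_cons]
    unfold pvFx
    rw [if_neg (by rintro (h | h) <;> omega)]
  · have hj0m : j0 = m := by omega
    subst hj0m
    rw [PySem.List.pyRange_one_eq_nil (le_refl j0)]
    simp only [List.map_nil, List.nil_append, List.headD_cons]
    unfold pvFx
    rw [if_pos (by omega)]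

lemma pv_brow (n m : Int) (ar : List (List Int)) (i : Int)
    (hm : 0 ≤ m) (hi0 : 0 ≤ i) (hi : i ≤ n - 1) :
    ∀ (r : Nat), (r : Int) ≤ m →
    (PySem.List.pyRange ((r : Int) - 1) (-1) (-1)).foldl
        (fun (row : List Int) j =>
          (if pvBGet ar i j == 1 then 0 else
            min (row.headD 0) (min (PySem.List.pyGetD (pvRowF n m ar (i+1)) j 0) (PySem.List.pyGetD (pvRowF n m ar (i+1)) (j+1) 0)) + 1) :: row)
        (pvSfx n m ar i (r : Int))
      = pvRowF n m ar i := by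
  intro r
  induction r with
  | zero =>
    intro _
    simp only [Nat.cast_zero, zero_sub]
    rw [PySem.List.pyRange_neg_one_eq_nil (le_refl (-1))]
    simp only [List.foldl_nil]
    rfl
  | succ r ih =>
    intro hr
    have hr' : ((r : Int)) + 1 ≤ m := by push_cast at hr; omega
    have hc : ((r+1 : Nat) : Int) - 1 = (r : Int) := by push_cast; ring
    have hcast : ((r+1 : Nat) : Int) = (r : Int) + 1 := by push_cast; ring
    rw [hc, hcast, PySem.List.pyRange_neg_one_cons (a := (r : Int)) (b := -1) (by omega),
        List.foldl_cons]
    have hb : pvBGet = pvAGet := rfl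
    have hv : (if pvBGet ar i ((r : Int)) == 1 then 0 else
          min ((pvSfx n m ar i ((r : Int)+1)).headD 0)
            (min (PySem.List.pyGetD (pvRowF n m ar (i+1)) ((r : Int)) 0)
              (PySem.List.pyGetD (pvRowF n m ar (i+1)) ((r : Int)+1) 0)) + 1)
        = pvF n m ar i ((r : Int)) := by
      rw [pv_sfx_head n m ar i ((r : Int)+1) hi (by omega) (by omega),
          pvRow_get_fx n m ar (i+1) ((r : Int)) hm (by omega) (by omega)
            (by exact_mod_cast Nat.zero_le r) (by omega),
          pvRow_get_fx n m ar (i+1) ((r : Int)+1) hm (by omega) (by omega) (by omega) (by omega),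
          hb]
      exact (pvF_step n m ar i ((r : Int)) hi0 hi (by exact_mod_cast Nat.zero_le r) (by omega)).symm
    rw [hv]
    have hsfx : pvF n m ar i ((r : Int)) :: pvSfx n m ar i ((r : Int)+1) = pvSfx n m ar i ((r : Int)) := by
      unfold pvSfx
      rw [PySem.List.pyRange_one_cons (a := (r : Int)) (b := m) (by omega)]
      simp only [List.map_cons, List.cons_append]
    rw [hsfx]
    exact ih (by omega)

lemma pv_bbuild (n m : Int) (ar : List (List Int)) (hm : 0 ≤ m) :
    ∀ (k : Nat), (k : Int) ≤ n → ∀ (acc : List (List Int)),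
    (PySem.List.pyRange ((k : Int) - 1) (-1) (-1)).foldl
        (fun (st : List (List Int) × List Int) i =>
          let row := (PySem.List.pyRange (m-1) (-1) (-1)).foldl
            (fun (row : List Int) j =>
              (if pvBGet ar i j == 1 then 0 else
                min (row.headD 0) (min (PySem.List.pyGetD st.2 j 0) (PySem.List.pyGetD st.2 (j+1) 0)) + 1) :: row) [0];
          (row :: st.1, row))
        (acc, pvRowF n m ar (k : Int))
      = ((PySem.List.pyRange 0 (k : Int) 1).map (pvRowF n m ar) ++ acc, pvRowF n m ar 0) := by
  intro k
  induction k with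
  | zero =>
    intro _ acc
    simp only [Nat.cast_zero, zero_sub]
    rw [PySem.List.pyRange_neg_one_eq_nil (le_refl (-1)),
        PySem.List.pyRange_one_eq_nil (le_refl 0)]
    simp only [List.foldl_nil, List.map_nil, List.nil_append]
  | succ k ih =>
    intro hk acc
    have hk' : (k : Int) + 1 ≤ n := by push_cast at hk; omega
    have hc : ((k+1 : Nat) : Int) - 1 = (k : Int) := by push_cast; ring
    have hcast : ((k+1 : Nat) : Int) = (k : Int) + 1 := by push_cast; ring
    rw [hc, hcast, PySem.List.pyRange_neg_one_cons (a := (k : Int)) (b := -1) (by omega),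
        List.foldl_cons]
    have hrange : PySem.List.pyRange (m-1) (-1) (-1)
        = PySem.List.pyRange (((m.toNat : Nat) : Int) - 1) (-1) (-1) := by
      rw [Int.toNat_of_nonneg hm]
    have hstart : ([0] : List Int) = pvSfx n m ar ((k : Int)) ((m.toNat : Nat) : Int) := by
      unfold pvSfx
      rw [Int.toNat_of_nonneg hm, PySem.List.pyRange_one_eq_nil (le_refl m)]
      simp
    have hrow : (PySem.List.pyRange (m-1) (-1) (-1)).foldl
        (fun (row : List Int) j =>
          (if pvBGet ar ((k : Int)) j == 1 then 0 else
            min (row.headD 0) (min (PySem.List.pyGetD (pvRowF n m ar ((k : Int)+1)) j 0)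
              (PySem.List.pyGetD (pvRowF n m ar ((k : Int)+1)) (j+1) 0)) + 1) :: row) [0]
        = pvRowF n m ar ((k : Int)) := by
      rw [hrange, hstart,
          pv_brow n m ar ((k : Int)) hm (by exact_mod_cast Nat.zero_le k) (by omega)
            m.toNat (by omega)]
    dsimp only
    rw [hrow, ih (by omega) (pvRowF n m ar ((k : Int)) :: acc),
        PySem.List.pyRange_one_succ_right (by exact_mod_cast Nat.zero_le k)]
    simp [List.map_append]

lemma pv_flatMap_cons_perm {α β : Type} (l : List α) (f : α → β) (g : α → List β) :
    (l.flatMap (fun x => f x :: g x)).Perm (l.map f ++ l.flatMap g) := by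
  induction l with
  | nil => simp
  | cons a l ih =>
    simp only [List.flatMap_cons, List.map_cons, List.cons_append]
    refine List.Perm.cons (f a) ?_
    refine (List.Perm.append_left (g a) ih).trans ?_
    exact List.perm_append_comm_assoc (g a) (l.map f) (l.flatMap g)

lemma pv_swap_perm {α β : Type} (l1 : List α) (l2 : List β) :
    (l1.flatMap (fun i => l2.map (fun j => (i, j)))).Perm
      (l2.flatMap (fun j => l1.map (fun i => (i, j)))) := by
  induction l1 with
  | nil => simp
  | cons a l1 ih =>
    simp only [List.flatMap_cons, List.map_cons]
    refine List.Perm.trans ?_ (pv_flatMap_cons_perm l2 (fun j => (a, j)) (fun j => l1.map (fun i => (i, j)))).symm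
    exact List.Perm.append_left (l2.map (fun j => (a, j))) ih

lemma pv_cells_perm (n m : Int) :
    (pvCells n m).Perm
      ((PySem.List.pyRange 0 (n-1) 1).flatMap
        (fun i => (PySem.List.pyRange 0 (m-1) 1).map (fun j => (i, j)))) := by
  unfold pvCells
  rw [PySem.List.pyRange_neg_one_eq_reverse (n-2) (-1),
      PySem.List.pyRange_neg_one_eq_reverse (m-2) (-1)]
  have h1 : ((-1 : Int) + 1) = 0 := by ring
  have h2 : ((n : Int) - 2 + 1) = n - 1 := by ring
  have h3 : ((m : Int) - 2 + 1) = m - 1 := by ring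
  rw [h1, h2, h3]
  refine List.Perm.flatMap (List.reverse_perm _) ?_
  intro a _
  exact List.Perm.map _ (List.reverse_perm _)

def pvCellsB (n m : Int) : List (Int × Int) :=
  (PySem.List.pyRange 0 (m-1) 1).flatMap
    (fun j => (PySem.List.pyRange 0 (n-1) 1).map (fun i => (i, j)))

lemma pv_cellsB_perm (n m : Int) :
    (pvCellsB n m).Perm
      ((PySem.List.pyRange 0 (n-1) 1).flatMap
        (fun i => (PySem.List.pyRange 0 (m-1) 1).map (fun j => (i, j)))) := by
  exact (pv_swap_perm (PySem.List.pyRange 0 (n-1) 1) (PySem.List.pyRange 0 (m-1) 1)).symm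

lemma pv_max_perm (w : Int × Int → Int) (L1 L2 : List (Int × Int)) (h : L1.Perm L2) :
    pvMax w L1 = pvMax w L2 := by
  unfold pvMax
  exact @List.Perm.foldl_eq _ _ _ _ _ ⟨by intro b c1 c2; rw [max_right_comm]⟩ h 0

lemma pv_lex1 (a b c d : Int) (h : a < c) : ([a, b] : List Int) < [c, d] := by
  simp [List.cons_lt_cons_iff]; omega

lemma pv_lex2 (a b c d : Int) (h1 : a = c) (h2 : b < d) : ([a, b] : List Int) < [c, d] := by
  simp [List.cons_lt_cons_iff]; omega

lemma pv_cellsB_pairwise (n m : Int) :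
    (pvCellsB n m).Pairwise (fun c c' => pvPos c < pvPos c') := by
  unfold pvCellsB
  rw [List.pairwise_flatMap]
  constructor
  · intro j _
    rw [List.pairwise_map]
    refine (PySem.List.pairwise_lt_pyRange_one 0 (n-1)).imp ?_
    intro a b hab
    exact pv_lex2 j a j b rfl hab
  · refine (PySem.List.pairwise_lt_pyRange_one 0 (m-1)).imp ?_
    intro j j' hjj' x hx y hy
    rw [List.mem_map] at hx hy
    obtain ⟨i, -, rfl⟩ := hx
    obtain ⟨i', -, rfl⟩ := hy
    exact pv_lex1 j i j' i' hjj'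

lemma pv_dpget (n m : Int) (ar : List (List Int)) (i j : Int) (hm : 0 ≤ m)
    (h1 : 0 ≤ i) (h2 : i < n) (h3 : 0 ≤ j) (h4 : j < m) :
    pvBGet ((PySem.List.pyRange 0 n 1).map (pvRowF n m ar)) i j = pvF n m ar i j := by
  show PySem.List.pyGetD (PySem.List.pyGetD ((PySem.List.pyRange 0 n 1).map (pvRowF n m ar)) i []) j 0 = _
  rw [PySem.List.pyGetD_map_pyRange_of_nonneg (pvRowF n m ar) n i [] h1 h2,
      pvRow_get_fx n m ar i j hm h1 (by omega) h3 (by omega)]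
  unfold pvFx
  rw [if_neg (by omega)]

lemma pv_processB (n m : Int) (ar : List (List Int)) (hn : 2 ≤ n) (hm : 2 ≤ m) :
    process_alt n m ar
      = ((((pvCellsB n m).filter (fun c => pvW n m ar c == pvMax (pvW n m ar) (pvCells n m))).length : Int),
         ((pvCellsB n m).filter (fun c => pvW n m ar c == pvMax (pvW n m ar) (pvCells n m))).map pvPos,
         pvMax (pvW n m ar) (pvCells n m)) := by
  have hn0 : (0 : Int) ≤ n := by omega
  have hm0 : (0 : Int) ≤ m := by omega
  have hcast : ((n.toNat : Nat) : Int) = n := Int.toNat_of_nonneg hn0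
  have hrep : List.replicate (m+1).toNat (0 : Int) = pvRowF n m ar n := by
    unfold pvRowF pvSfx
    have h1 : (PySem.List.pyRange 0 m 1).map (fun j => pvF n m ar n j) = List.replicate m.toNat 0 := by
      rw [List.eq_replicate_iff]
      refine ⟨by simp [PySem.List.length_pyRange_one], ?_⟩
      intro b hb
      rw [List.mem_map] at hb
      obtain ⟨j, hj, rfl⟩ := hb
      rw [PySem.List.mem_pyRange_one] at hj
      exact pvF_row_n n m ar j hj.2
    rw [h1, show (m+1).toNat = m.toNat + 1 from by omega, List.replicate_succ']
  have HB := pv_bbuild n m ar hm0 n.toNat (by omega) []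
  rw [hcast] at HB
  simp only [process_alt]
  rw [if_neg (by omega), hrep, HB]
  dsimp only
  rw [List.append_nil]
  have hbig : (PySem.List.pyRange 0 (n-1) 1).foldl
      (fun big i => (PySem.List.pyRange 0 (m-1) 1).foldl
        (fun big j => if pvBGet ((PySem.List.pyRange 0 n 1).map (pvRowF n m ar)) i j > big
          then pvBGet ((PySem.List.pyRange 0 n 1).map (pvRowF n m ar)) i j else big) big) 0
      = pvMax (pvW n m ar) (pvCells n m) := by
    have s1 : (PySem.List.pyRange 0 (n-1) 1).foldl
        (fun big i => (PySem.List.pyRange 0 (m-1) 1).foldl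
          (fun big j => if pvBGet ((PySem.List.pyRange 0 n 1).map (pvRowF n m ar)) i j > big
            then pvBGet ((PySem.List.pyRange 0 n 1).map (pvRowF n m ar)) i j else big) big) 0
        = (PySem.List.pyRange 0 (n-1) 1).foldl
          (fun b i => (PySem.List.pyRange 0 (m-1) 1).foldl
            (fun b j => max b (pvW n m ar (i, j))) b) 0 := by
      apply PySem.List.foldl_congr_mem
      intro b i hi
      rw [PySem.List.mem_pyRange_one] at hi
      apply PySem.List.foldl_congr_mem
      intro b' j hj
      rw [PySem.List.mem_pyRange_one] at hj
      rw [pv_dpget n m ar i j hm0 (by omega) (by omega) (by omega) (by omega), pv_if_max]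
      rfl
    have s2 : (PySem.List.pyRange 0 (n-1) 1).foldl
          (fun b i => (PySem.List.pyRange 0 (m-1) 1).foldl
            (fun b j => max b (pvW n m ar (i, j))) b) 0
        = pvMax (pvW n m ar) ((PySem.List.pyRange 0 (n-1) 1).flatMap
            (fun i => (PySem.List.pyRange 0 (m-1) 1).map (fun j => (i, j)))) := by
      unfold pvMax
      rw [List.foldl_flatMap]
      simp only [List.foldl_map]
    rw [s1, s2]
    exact pv_max_perm (pvW n m ar) _ _ (pv_cells_perm n m).symm
  rw [hbig]
  have hans : (PySem.List.pyRange 0 (m-1) 1).flatMap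
      (fun j => ((PySem.List.pyRange 0 (n-1) 1).filter
        (fun i => pvBGet ((PySem.List.pyRange 0 n 1).map (pvRowF n m ar)) i j == pvMax (pvW n m ar) (pvCells n m))).map
        (fun i => [j, i]))
      = ((pvCellsB n m).filter (fun c => pvW n m ar c == pvMax (pvW n m ar) (pvCells n m))).map pvPos := by
    unfold pvCellsB
    rw [List.filter_flatMap, List.map_flatMap]
    apply List.flatMap_congr
    intro j hj
    rw [PySem.List.mem_pyRange_one] at hj
    rw [List.filter_map, List.map_map]
    have hfc : ((PySem.List.pyRange 0 (n-1) 1).filter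
        (fun i => pvBGet ((PySem.List.pyRange 0 n 1).map (pvRowF n m ar)) i j == pvMax (pvW n m ar) (pvCells n m)))
        = ((PySem.List.pyRange 0 (n-1) 1).filter
          ((fun c => pvW n m ar c == pvMax (pvW n m ar) (pvCells n m)) ∘ (fun i => (i, j)))) := by
      apply List.filter_congr
      intro i hi
      rw [PySem.List.mem_pyRange_one] at hi
      rw [pv_dpget n m ar i j hm0 (by omega) (by omega) (by omega) (by omega)]
      rfl
    rw [hfc]
    rfl
  rw [hans]
  simp only [List.length_map]

lemma pv_degenerate_A (n m : Int) (ar : List (List Int)) (h : n ≤ 1 ∨ m ≤ 1) :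
    process n m ar = (0, [], 0) := by
  simp only [process]
  rcases h with hn | hm
  · rw [PySem.List.pyRange_neg_one_eq_nil (a := n-2) (b := -1) (by omega)]
    simp only [List.foldl_nil]
    rfl
  · rw [PySem.List.pyRange_neg_one_eq_nil (a := m-2) (b := -1) (by omega)]
    simp only [List.foldl_nil, PySem.List.foldl_ignore]
    rfl

lemma pv_degenerate_B (n m : Int) (ar : List (List Int)) (h : n ≤ 1 ∨ m ≤ 1) :
    process_alt n m ar = (0, [], 0) := by
  simp only [process_alt]
  rw [if_pos (by omega)]

-- ===== VERDICT (by name: the statement is the Claim_ definition above) =====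
theorem process_spec : Claim_equal_process := by
  intro n m ar _ _
  unfold Spec_process
  by_cases h : 2 ≤ n ∧ 2 ≤ m
  · obtain ⟨hn, hm⟩ := h
    rw [pv_processA n m ar, pv_processB n m ar hn hm]
    have hperm : ((pvCellsB n m).filter (fun c => pvW n m ar c == pvMax (pvW n m ar) (pvCells n m))).Perm
        ((pvCells n m).filter (fun c => pvW n m ar c == pvMax (pvW n m ar) (pvCells n m))) := by
      exact List.Perm.filter _ ((pv_cellsB_perm n m).trans (pv_cells_perm n m).symm)
    refine Prod.ext ?_ (Prod.ext ?_ rfl)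
    · simp [hperm.length_eq]
    · show PySem.List.sorted _ (fun x => x) false = _
      have hpw : (((pvCellsB n m).filter (fun c => pvW n m ar c == pvMax (pvW n m ar) (pvCells n m))).map pvPos).Pairwise (· < ·) := by
        refine List.Pairwise.map _ (fun a b h => h) ?_
        exact ((pv_cellsB_pairwise n m).sublist (List.filter_sublist))
      have h := PySem.List.sorted_eq_of_perm_of_pairwise_lt
        (((pvCells n m).filter (fun c => pvW n m ar c == pvMax (pvW n m ar) (pvCells n m))).map pvPos)
        (((pvCellsB n m).filter (fun c => pvW n m ar c == pvMax (pvW n m ar) (pvCells n m))).map pvPos)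
        (fun a => a) (hperm.map pvPos) hpw
      convert h using 2
  · rw [pv_degenerate_A n m ar (by omega), pv_degenerate_B n m ar (by omega)]
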